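-- pv_equiv track=rewrite | github.com/sirolad/PoliverAI | src/poliverai/rag/verification.py | _check_compliance_fulfillments
-- ===== SOURCE A (Python) =====
-- from typing import Any
--
-- def _check_compliance_fulfillments(text_lower: str) -> list[dict[str, Any]]:
--     """Check for positive compliance indicators."""
--     fulfills = []
--
--     # General GDPR acknowledgment
--     if "gdpr" in text_lower or "data protection regulation" in text_lower:
--         fulfills.append({"article": "General Compliance", "reason": "Acknowledges GDPR compliance"})
--
--     # Article 6 fulfillments
--     if any(term in text_lower for term in ["consent", "lawful basis", "article 6"]):
--         fulfills.append({"article": "Article 6(1)", "reason": "Mentions lawful basis or consent"})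
--
--     # Article 13 fulfillments
--     if any(term in text_lower for term in ["data controller", "controller"]):
--         fulfills.append({"article": "Article 13", "reason": "Identifies data controller"})
--
--     if any(term in text_lower for term in ["contact", "email", "phone"]):
--         fulfills.append({"article": "Article 13", "reason": "Provides contact information"})
--
--     # Article 5 and 17 fulfillments
--     if any(term in text_lower for term in ["retention", "delete", "deletion", "remove"]):
--         fulfills.append(
--             {"article": "Article 5(1)(e)", "reason": "Addresses data retention/deletion"}
--         )
--
--     if "erasure" in text_lower or "right to be forgotten" in text_lower:
--         fulfills.append({"article": "Article 17", "reason": "Mentions right to erasure"})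
--
--     return fulfills
-- ===== SOURCE B (Python) =====
-- from typing import Any
--
-- # term -> rule-index table (rules 0..5 in A's output order)
-- _TERM_RULES = [
--     ("gdpr", 0), ("data protection regulation", 0),
--     ("consent", 1), ("lawful basis", 1), ("article 6", 1),
--     ("data controller", 2), ("controller", 2),
--     ("contact", 3), ("email", 3), ("phone", 3),
--     ("retention", 4), ("delete", 4), ("deletion", 4), ("remove", 4),
--     ("erasure", 5), ("right to be forgotten", 5),
-- ]
--
-- _RULE_OUT = [
--     ("General Compliance", "Acknowledges GDPR compliance"),
--     ("Article 6(1)", "Mentions lawful basis or consent"),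
--     ("Article 13", "Identifies data controller"),
--     ("Article 13", "Provides contact information"),
--     ("Article 5(1)(e)", "Addresses data retention/deletion"),
--     ("Article 17", "Mentions right to erasure"),
-- ]
--
-- def _check_compliance_fulfillments(text_lower: str) -> list[dict[str, Any]]:
--     """Single left-to-right scan over the text: at each position, mark every
--     rule one of whose terms starts exactly there; then emit rules in order."""
--     hits = set()
--     for i in range(len(text_lower)):
--         for term, rule in _TERM_RULES:
--             if text_lower.startswith(term, i):
--                 hits.add(rule)
--     return [{"article": art, "reason": rsn}
--             for rule, (art, rsn) in enumerate(_RULE_OUT) if rule in hits]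
-- ===== Notes on version B (the rewrite author's own statement) =====
-- stated objective: alternative
-- what changed: Instead of six independent substring searches ('in'), B makes one left-to-right scan of the text, at each position marking in a hit-set every rule whose term starts there (multi-pattern position scan), then emits the rule outputs in order from the hit-set.
import Mathlib
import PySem

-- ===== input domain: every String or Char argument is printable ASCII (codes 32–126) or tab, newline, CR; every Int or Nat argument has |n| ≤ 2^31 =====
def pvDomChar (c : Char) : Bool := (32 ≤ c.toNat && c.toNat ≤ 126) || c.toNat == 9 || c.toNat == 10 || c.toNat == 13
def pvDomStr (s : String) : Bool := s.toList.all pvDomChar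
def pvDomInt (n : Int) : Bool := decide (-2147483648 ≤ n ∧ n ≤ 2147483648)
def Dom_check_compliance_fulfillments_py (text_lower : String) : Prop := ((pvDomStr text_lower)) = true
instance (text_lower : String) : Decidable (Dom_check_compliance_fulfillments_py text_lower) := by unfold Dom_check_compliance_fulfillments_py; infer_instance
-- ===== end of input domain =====

-- B replaces A's six independent substring searches by one left-to-right positional scan that marks matched rules in a hit-set; objective: alternative algorithm, same cost.


-- ===== PORT A =====
def check_compliance_fulfillments_py (text_lower : String) : List (List (String × String)) :=
  let fulfills : List (List (String × String)) := []
  let fulfills := if PySem.Str.isIn "gdpr" text_lower || PySem.Str.isIn "data protection regulation" text_lower then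
      fulfills ++ [[("article", "General Compliance"), ("reason", "Acknowledges GDPR compliance")]] else fulfills
  let fulfills := if ["consent", "lawful basis", "article 6"].any (fun term => PySem.Str.isIn term text_lower) then
      fulfills ++ [[("article", "Article 6(1)"), ("reason", "Mentions lawful basis or consent")]] else fulfills
  let fulfills := if ["data controller", "controller"].any (fun term => PySem.Str.isIn term text_lower) then
      fulfills ++ [[("article", "Article 13"), ("reason", "Identifies data controller")]] else fulfills
  let fulfills := if ["contact", "email", "phone"].any (fun term => PySem.Str.isIn term text_lower) then
      fulfills ++ [[("article", "Article 13"), ("reason", "Provides contact information")]] else fulfills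
  let fulfills := if ["retention", "delete", "deletion", "remove"].any (fun term => PySem.Str.isIn term text_lower) then
      fulfills ++ [[("article", "Article 5(1)(e)"), ("reason", "Addresses data retention/deletion")]] else fulfills
  let fulfills := if PySem.Str.isIn "erasure" text_lower || PySem.Str.isIn "right to be forgotten" text_lower then
      fulfills ++ [[("article", "Article 17"), ("reason", "Mentions right to erasure")]] else fulfills
  fulfills

-- ===== PORT B =====
-- _TERM_RULES: term -> rule-index table (rules 0..5 in A's output order)
def pvTermRules : List (List Char × Int) :=
  [ ("gdpr".toList, 0), ("data protection regulation".toList, 0),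
    ("consent".toList, 1), ("lawful basis".toList, 1), ("article 6".toList, 1),
    ("data controller".toList, 2), ("controller".toList, 2),
    ("contact".toList, 3), ("email".toList, 3), ("phone".toList, 3),
    ("retention".toList, 4), ("delete".toList, 4), ("deletion".toList, 4), ("remove".toList, 4),
    ("erasure".toList, 5), ("right to be forgotten".toList, 5) ]

-- _RULE_OUT
def pvRuleOut : List (String × String) :=
  [ ("General Compliance", "Acknowledges GDPR compliance"),
    ("Article 6(1)", "Mentions lawful basis or consent"),
    ("Article 13", "Identifies data controller"),
    ("Article 13", "Provides contact information"),
    ("Article 5(1)(e)", "Addresses data retention/deletion"),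
    ("Article 17", "Mentions right to erasure") ]

-- inner loop: 'for term, rule in _TERM_RULES: if text_lower.startswith(term, i): hits.add(rule)'
-- (text_lower.startswith(term, i) with 0 <= i is exactly: term is a prefix of the i-th suffix)
def pvMarkAt (tl : List Char) (hits : PySem.Set Int) : PySem.Set Int :=
  pvTermRules.foldl (fun h tr => if tr.1.isPrefixOf tl then PySem.Set.add h tr.2 else h) hits

-- outer loop 'for i in range(len(text_lower))': visiting index i means looking at the i-th
-- suffix chars.drop i, so the loop is the structural recursion over the suffixes, in order.
def pvScan : List Char → PySem.Set Int → PySem.Set Int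
  | [], hits => hits
  | c :: rest, hits => pvScan rest (pvMarkAt (c :: rest) hits)

def check_compliance_fulfillments_py_alt (text_lower : String) : List (List (String × String)) :=
  let hits := pvScan text_lower.toList PySem.Set.empty
  ((PySem.List.enumerate pvRuleOut).filter (fun p => PySem.Set.contains hits p.1)).map
    (fun p => [("article", p.2.1), ("reason", p.2.2)])

-- ===== PRECONDITION & SPEC =====
def Spec_check_compliance_fulfillments_py (text_lower : String) (out : List (List (String × String))) : Prop := out = check_compliance_fulfillments_py_alt text_lower
instance (text_lower : String) (out : List (List (String × String))) : Decidable (Spec_check_compliance_fulfillments_py text_lower out) := by unfold Spec_check_compliance_fulfillments_py; infer_instance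

-- ===== CLAIM (what is proved, stated in full; the proofs are below) =====
def Claim_equal_check_compliance_fulfillments_py : Prop := ∀ (text_lower : String), Dom_check_compliance_fulfillments_py text_lower → Spec_check_compliance_fulfillments_py text_lower (check_compliance_fulfillments_py text_lower)

-- ===== LEMMAS AND PROOFS =====

-- membership after the inner loop over the term table
theorem pv_mem_markAt (tl : List Char) (hits : PySem.Set Int) (r : Int) :
    r ∈ pvMarkAt tl hits ↔ r ∈ hits ∨ ∃ tr ∈ pvTermRules, tr.1.isPrefixOf tl = true ∧ tr.2 = r := by
  unfold pvMarkAt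
  generalize pvTermRules = ts
  induction ts generalizing hits with
  | nil => simp
  | cons t ts ih =>
    rw [List.foldl_cons, ih]
    constructor
    · rintro (h | ⟨tr, htr, h1, h2⟩)
      · by_cases hp : t.1.isPrefixOf tl = true
        · rw [if_pos hp] at h
          rcases (PySem.Set.mem_add hits t.2 r).mp h with h' | h'
          · exact Or.inl h'
          · exact Or.inr ⟨t, by simp, hp, h'.symm⟩
        · rw [if_neg hp] at h
          exact Or.inl h
      · exact Or.inr ⟨tr, List.mem_cons_of_mem _ htr, h1, h2⟩
    · rintro (h | ⟨tr, htr, h1, h2⟩)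
      · left
        split_ifs with hp
        · exact (PySem.Set.mem_add hits t.2 r).mpr (Or.inl h)
        · exact h
      · rcases List.mem_cons.mp htr with rfl | htr'
        · left
          rw [if_pos h1]
          exact (PySem.Set.mem_add hits tr.2 r).mpr (Or.inr h2.symm)
        · exact Or.inr ⟨tr, htr', h1, h2⟩

-- membership after the scan: r is hit iff some term of rule r starts at some position
theorem pv_mem_scan (l : List Char) (hits : PySem.Set Int) (r : Int) :
    r ∈ pvScan l hits ↔ r ∈ hits ∨ ∃ tr ∈ pvTermRules, (∃ j, tr.1 <+: l.drop j) ∧ tr.2 = r := by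
  induction l generalizing hits with
  | nil =>
    simp only [pvScan, List.drop_nil]
    constructor
    · exact Or.inl
    · rintro (h | ⟨tr, htr, ⟨j, hpre⟩, hr⟩)
      · exact h
      · have hne : ∀ tr ∈ pvTermRules, tr.1 ≠ [] := by decide
        exact absurd (List.prefix_nil.mp hpre) (hne tr htr)
  | cons c rest ih =>
    simp only [pvScan]
    rw [ih, pv_mem_markAt]
    constructor
    · rintro ((h | ⟨tr, htr, hpre, hr⟩) | ⟨tr, htr, ⟨j, hpre⟩, hr⟩)
      · exact Or.inl h
      · exact Or.inr ⟨tr, htr, ⟨0, by simpa using List.isPrefixOf_iff_prefix.mp hpre⟩, hr⟩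
      · exact Or.inr ⟨tr, htr, ⟨j + 1, by simpa using hpre⟩, hr⟩
    · rintro (h | ⟨tr, htr, ⟨j, hpre⟩, hr⟩)
      · exact Or.inl (Or.inl h)
      · cases j with
        | zero => exact Or.inl (Or.inr ⟨tr, htr, List.isPrefixOf_iff_prefix.mpr (by simpa using hpre), hr⟩)
        | succ j => exact Or.inr ⟨tr, htr, ⟨j, by simpa using hpre⟩, hr⟩

-- the hit-set membership for a fixed rule index is Python's 'sub in text' disjunction
theorem pv_hit_iff (t : String) (r : Int) :
    r ∈ pvScan t.toList PySem.Set.empty ↔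
      ∃ tr ∈ pvTermRules, PySem.Chars.isIn tr.1 t.toList = true ∧ tr.2 = r := by
  rw [pv_mem_scan]
  simp only [PySem.Set.empty, List.not_mem_nil, false_or]
  constructor
  · rintro ⟨tr, htr, ⟨j, hpre⟩, hr⟩
    exact ⟨tr, htr, (PySem.Chars.exists_prefix_drop_iff_isIn tr.1 t.toList).mp ⟨j, hpre⟩, hr⟩
  · rintro ⟨tr, htr, hin, hr⟩
    exact ⟨tr, htr, (PySem.Chars.exists_prefix_drop_iff_isIn tr.1 t.toList).mpr hin, hr⟩

theorem pv_contains_eq (t : String) (r : Int) (c : Bool)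
    (h : (∃ tr ∈ pvTermRules, PySem.Chars.isIn tr.1 t.toList = true ∧ tr.2 = r) ↔ c = true) :
    PySem.Set.contains (pvScan t.toList PySem.Set.empty) r = c := by
  rcases Bool.eq_false_or_eq_true c with hc | hc <;> subst hc
  · exact (PySem.Set.contains_iff _ _).mpr ((pv_hit_iff t r).mpr (h.mpr rfl))
  · rw [Bool.eq_false_iff]
    intro hx
    have hf := h.mp ((pv_hit_iff t r).mp ((PySem.Set.contains_iff _ _).mp hx))
    exact absurd hf (by simp)

theorem pv_c0 (t : String) : PySem.Set.contains (pvScan t.toList PySem.Set.empty) 0 =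
    (PySem.Str.isIn "gdpr" t || PySem.Str.isIn "data protection regulation" t) := by
  apply pv_contains_eq
  simp [pvTermRules, PySem.Str.isIn_eq]

theorem pv_c1 (t : String) : PySem.Set.contains (pvScan t.toList PySem.Set.empty) 1 =
    (["consent", "lawful basis", "article 6"].any (fun term => PySem.Str.isIn term t)) := by
  apply pv_contains_eq
  simp [pvTermRules, PySem.Str.isIn_eq]

theorem pv_c2 (t : String) : PySem.Set.contains (pvScan t.toList PySem.Set.empty) 2 =
    (["data controller", "controller"].any (fun term => PySem.Str.isIn term t)) := by
  apply pv_contains_eq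
  simp [pvTermRules, PySem.Str.isIn_eq]

theorem pv_c3 (t : String) : PySem.Set.contains (pvScan t.toList PySem.Set.empty) 3 =
    (["contact", "email", "phone"].any (fun term => PySem.Str.isIn term t)) := by
  apply pv_contains_eq
  simp [pvTermRules, PySem.Str.isIn_eq]

theorem pv_c4 (t : String) : PySem.Set.contains (pvScan t.toList PySem.Set.empty) 4 =
    (["retention", "delete", "deletion", "remove"].any (fun term => PySem.Str.isIn term t)) := by
  apply pv_contains_eq
  simp [pvTermRules, PySem.Str.isIn_eq]

theorem pv_c5 (t : String) : PySem.Set.contains (pvScan t.toList PySem.Set.empty) 5 =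
    (PySem.Str.isIn "erasure" t || PySem.Str.isIn "right to be forgotten" t) := by
  apply pv_contains_eq
  simp [pvTermRules, PySem.Str.isIn_eq]

-- ===== VERDICT (by name: the statement is the Claim_ definition above) =====
set_option maxHeartbeats 1000000 in
theorem check_compliance_fulfillments_py_spec : Claim_equal_check_compliance_fulfillments_py := by
  intro t _
  unfold Spec_check_compliance_fulfillments_py
  simp only [check_compliance_fulfillments_py, check_compliance_fulfillments_py_alt, pvRuleOut,
    PySem.List.enumerate_cons, PySem.List.enumerate_nil, List.filter_cons, List.filter_nil,
    Int.reduceAdd, pv_c0, pv_c1, pv_c2, pv_c3, pv_c4, pv_c5]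
  split_ifs <;> rfl
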